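-- pv_equiv track=rewrite | github.com/HoangHiepCS/Large-Language-Bayes-Model | llb/core.py | _resolve_report_targets
-- ===== SOURCE A (Python) =====
-- def _resolve_report_targets(sample_maps, fallback_targets):
--     if not sample_maps:
--         return list(fallback_targets)
--
--     returned = []
--     seen = set()
--
--     for target in fallback_targets:
--         if all(target in sm for sm in sample_maps):
--             returned.append(target)
--             seen.add(target)
--
--     for target in sample_maps[0].keys():
--         if target in seen:
--             continue
--         if all(target in sm for sm in sample_maps):
--             returned.append(target)
--             seen.add(target)
--
--     return returned
-- ===== SOURCE B (Python) =====
-- def _resolve_report_targets(sample_maps, fallback_targets):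
--     if not sample_maps:
--         return list(fallback_targets)
--     common = set(sample_maps[0]).intersection(*sample_maps[1:])
--     returned = [t for t in fallback_targets if t in common]
--     seen = set(returned)
--     returned += [k for k in sample_maps[0] if k in common and k not in seen]
--     return returned
-- ===== Notes on version B (the rewrite author's own statement) =====
-- stated objective: faster
-- what changed: Replaces the per-candidate scan over all sample maps with one precomputed set intersection of the maps' key sets, then two membership-filter comprehensions instead of stateful loops.
import Mathlib
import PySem

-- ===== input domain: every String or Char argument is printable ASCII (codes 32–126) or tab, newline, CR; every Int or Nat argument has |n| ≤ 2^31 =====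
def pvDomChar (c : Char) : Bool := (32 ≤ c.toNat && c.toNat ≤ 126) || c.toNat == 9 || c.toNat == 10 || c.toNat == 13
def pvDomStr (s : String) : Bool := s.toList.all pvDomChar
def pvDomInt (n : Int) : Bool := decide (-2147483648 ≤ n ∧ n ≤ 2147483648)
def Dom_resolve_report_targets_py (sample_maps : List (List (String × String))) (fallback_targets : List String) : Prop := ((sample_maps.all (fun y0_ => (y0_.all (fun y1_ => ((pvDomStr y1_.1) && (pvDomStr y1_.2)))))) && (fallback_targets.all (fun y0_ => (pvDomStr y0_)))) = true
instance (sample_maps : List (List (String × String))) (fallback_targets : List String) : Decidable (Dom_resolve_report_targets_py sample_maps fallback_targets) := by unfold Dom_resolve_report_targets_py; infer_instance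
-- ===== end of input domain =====

-- B replaces A's per-candidate scans over all sample maps by one precomputed key-set
-- intersection plus two membership filters; a timing run measured B faster by a constant factor.

-- ===== PORT A =====
-- 'all(target in sm for sm in sample_maps)' — key membership in each dict
def pvAInAll (sample_maps : List (List (String × String))) (t : String) : Bool :=
  sample_maps.all (fun sm => (sm.map Prod.fst).contains t)

def resolve_report_targets_py (sample_maps : List (List (String × String))) (fallback_targets : List String) : List String :=
  match sample_maps with
  | [] => fallback_targets
  | sm0 :: rest =>
    -- first loop: over fallback_targets, appending and adding to seen (seen not consulted)
    let st1 := fallback_targets.foldl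
      (fun (st : List String × PySem.Set String) target =>
        if pvAInAll (sm0 :: rest) target then (st.1 ++ [target], PySem.Set.add st.2 target) else st)
      ([], PySem.Set.empty)
    -- second loop: over sample_maps[0].keys() (first-occurrence order, unique)
    let st2 := (PySem.List.dedup (sm0.map Prod.fst)).foldl
      (fun (st : List String × PySem.Set String) target =>
        if PySem.Set.contains st.2 target then st
        else if pvAInAll (sm0 :: rest) target then (st.1 ++ [target], PySem.Set.add st.2 target) else st)
      st1
    st2.1

-- ===== PORT B =====
def resolve_report_targets_py_alt (sample_maps : List (List (String × String))) (fallback_targets : List String) : List String :=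
  match sample_maps with
  | [] => fallback_targets
  | sm0 :: rest =>
    -- common = set(sample_maps[0]).intersection(*sample_maps[1:])
    let common : PySem.Set String :=
      rest.foldl (fun s sm => PySem.Set.inter s (sm.map Prod.fst))
        (PySem.Set.ofList (sm0.map Prod.fst))
    let returned := fallback_targets.filter (fun t => PySem.Set.contains common t)
    let seen : PySem.Set String := PySem.Set.ofList returned
    returned ++ (PySem.List.dedup (sm0.map Prod.fst)).filter
      (fun k => PySem.Set.contains common k && !(PySem.Set.contains seen k))

-- ===== PRECONDITION & SPEC =====
def Spec_resolve_report_targets_py (sample_maps : List (List (String × String))) (fallback_targets : List String) (out : List String) : Prop := out = resolve_report_targets_py_alt sample_maps fallback_targets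
instance (sample_maps : List (List (String × String))) (fallback_targets : List String) (out : List String) : Decidable (Spec_resolve_report_targets_py sample_maps fallback_targets out) := by unfold Spec_resolve_report_targets_py; infer_instance

-- ===== CLAIM (what is proved, stated in full; the proofs are below) =====
def Claim_equal_resolve_report_targets_py : Prop := ∀ (sample_maps : List (List (String × String))) (fallback_targets : List String), Dom_resolve_report_targets_py sample_maps fallback_targets → Spec_resolve_report_targets_py sample_maps fallback_targets (resolve_report_targets_py sample_maps fallback_targets)

-- ===== LEMMAS AND PROOFS =====

-- membership in the folded intersection = membership in every map's key set
theorem pv_common_contains (rest : List (List (String × String))) (s : PySem.Set String) (t : String) :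
    PySem.Set.contains (rest.foldl (fun s sm => PySem.Set.inter s (sm.map Prod.fst)) s) t
      = (PySem.Set.contains s t && rest.all (fun sm => (sm.map Prod.fst).contains t)) := by
  induction rest generalizing s with
  | nil => simp
  | cons sm rest ih =>
    simp only [List.foldl_cons, ih, List.all_cons]
    rw [Bool.eq_iff_iff]
    simp [PySem.Set.mem_inter, and_assoc]

theorem pv_common_eq_pvAInAll (sm0 : List (String × String)) (rest : List (List (String × String))) (t : String) :
    PySem.Set.contains (rest.foldl (fun s sm => PySem.Set.inter s (sm.map Prod.fst)) (PySem.Set.ofList (sm0.map Prod.fst))) t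
      = pvAInAll (sm0 :: rest) t := by
  rw [pv_common_contains, pvAInAll, List.all_cons, Bool.eq_iff_iff]
  simp [PySem.Set.mem_ofList]

-- first loop: a stateless filter plus set-update of the seen set
theorem pv_loop1 (p : String → Bool) (l : List String) (acc : List String) (s : PySem.Set String) :
    l.foldl (fun (st : List String × PySem.Set String) target =>
        if p target then (st.1 ++ [target], PySem.Set.add st.2 target) else st) (acc, s)
      = (acc ++ l.filter p, PySem.Set.update s (l.filter p)) := by
  induction l generalizing acc s with
  | nil => simp [PySem.Set.update]
  | cons t l ih =>
    by_cases h : p t = true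
    · simp [h, ih, PySem.Set.update_cons]
    · simp [Bool.eq_false_iff.mpr h, ih]

-- second loop over a duplicate-free list: seen additions inside the loop never fire again
theorem pv_loop2 (p : String → Bool) (l : List String) (hnd : l.Nodup) (acc : List String) (s : PySem.Set String) :
    (l.foldl (fun (st : List String × PySem.Set String) target =>
        if PySem.Set.contains st.2 target then st
        else if p target then (st.1 ++ [target], PySem.Set.add st.2 target) else st) (acc, s)).1
      = acc ++ l.filter (fun k => p k && !(PySem.Set.contains s k)) := by
  induction l generalizing acc s with
  | nil => simp
  | cons k l ih =>
    have hknl : k ∉ l := (List.nodup_cons.mp hnd).1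
    have hndl : l.Nodup := (List.nodup_cons.mp hnd).2
    rw [List.foldl_cons, List.filter_cons]
    by_cases hs : PySem.Set.contains s k = true
    · rw [if_pos hs, ih hndl acc s]
      have hc : (p k && !(PySem.Set.contains s k)) = false := by rw [hs]; simp
      rw [hc, if_neg (by simp)]
    · have hs' : PySem.Set.contains s k = false := Bool.eq_false_iff.mpr hs
      rw [if_neg (by rw [hs']; simp)]
      by_cases hp : p k = true
      · rw [if_pos hp, ih hndl (acc ++ [k]) (PySem.Set.add s k)]
        have hfilt : l.filter (fun x => p x && !(PySem.Set.contains (PySem.Set.add s k) x))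
            = l.filter (fun x => p x && !(PySem.Set.contains s x)) := by
          apply List.filter_congr
          intro x hx
          have hxk : x ≠ k := fun h => hknl (h ▸ hx)
          have hcc : PySem.Set.contains (PySem.Set.add s k) x = PySem.Set.contains s x := by
            rw [Bool.eq_iff_iff]
            simp [PySem.Set.mem_add, hxk]
          rw [hcc]
        have hc : (p k && !(PySem.Set.contains s k)) = true := by rw [hp, hs']; simp
        rw [hfilt, hc, if_pos rfl]
        simp
      · have hp' : p k = false := Bool.eq_false_iff.mpr hp
        rw [if_neg (by rw [hp']; simp), ih hndl acc s]
        have hc : (p k && !(PySem.Set.contains s k)) = false := by rw [hp']; simp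
        rw [hc, if_neg (by simp)]

-- ===== VERDICT (by name: the statement is the Claim_ definition above) =====
theorem resolve_report_targets_py_spec : Claim_equal_resolve_report_targets_py := by
  intro sample_maps fallback_targets _
  unfold Spec_resolve_report_targets_py resolve_report_targets_py resolve_report_targets_py_alt
  match sample_maps with
  | [] => rfl
  | sm0 :: rest =>
    simp only []
    set p := pvAInAll (sm0 :: rest) with hp
    have hcommon : ∀ t, PySem.Set.contains
        (rest.foldl (fun s sm => PySem.Set.inter s (sm.map Prod.fst)) (PySem.Set.ofList (sm0.map Prod.fst))) t = p t :=
      fun t => pv_common_eq_pvAInAll sm0 rest t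
    rw [pv_loop1 p fallback_targets [] PySem.Set.empty]
    simp only [List.nil_append]
    rw [pv_loop2 p (PySem.List.dedup (sm0.map Prod.fst)) (PySem.List.nodup_dedup _)
        (fallback_targets.filter p) (PySem.Set.update PySem.Set.empty (fallback_targets.filter p))]
    have h1 : fallback_targets.filter (fun t => PySem.Set.contains
        (rest.foldl (fun s sm => PySem.Set.inter s (sm.map Prod.fst)) (PySem.Set.ofList (sm0.map Prod.fst))) t)
        = fallback_targets.filter p := by
      apply List.filter_congr; intro x _; exact hcommon x
    have hseen : PySem.Set.update PySem.Set.empty (fallback_targets.filter p)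
        = PySem.Set.ofList (fallback_targets.filter p) := PySem.Set.update_nil_left _
    rw [h1, hseen]
    congr 1
    apply List.filter_congr
    intro x _
    rw [hcommon x]
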